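-- pv_equiv track=rewrite | github.com/azzindani/MCP_Machine_Learning | servers/ml_medium/engine.py | _validate_ops
-- ===== SOURCE A (Python) =====
-- ALLOWED_OPS = {
--     "fill_nulls",
--     "drop_outliers",
--     "label_encode",
--     "onehot_encode",
--     "scale",
--     "drop_duplicates",
--     "drop_column",
--     "rename_column",
--     "convert_dtype",
--     "bin_numeric",
--     "add_date_parts",
--     "log_transform",
--     "drop_null_rows",
--     "clip_column",
-- }
--
-- FILL_STRATEGIES = {"mean", "median", "mode", "ffill", "bfill", "zero"}
--
-- SCALE_METHODS = {"standard", "minmax"}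
--
-- MAX_OPS = 50
--
-- def _validate_ops(ops: list[dict]) -> tuple[bool, str]:
--     """Validate preprocessing ops array. Returns (ok, error_msg)."""
--     if not isinstance(ops, list):
--         return False, "ops must be a list of dicts."
--     if len(ops) > MAX_OPS:
--         return False, f"Too many ops: {len(ops)}. Max is {MAX_OPS}."
--     for i, op in enumerate(ops):
--         if not isinstance(op, dict):
--             return False, f"Op #{i} is not a dict."
--         op_name = op.get("op", "")
--         if op_name not in ALLOWED_OPS:
--             return False, f"Unknown op: '{op_name}'. Allowed: {', '.join(sorted(ALLOWED_OPS))}"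
--         if op_name == "fill_nulls":
--             if "column" not in op:
--                 return False, f"Op '{op_name}' missing required field: 'column'"
--             strategy = op.get("strategy", "median")
--             if strategy not in FILL_STRATEGIES:
--                 return False, (
--                     f"Strategy '{strategy}' not valid for fill_nulls. Allowed: {' '.join(sorted(FILL_STRATEGIES))}"
--                 )
--         elif op_name == "scale":
--             if "columns" not in op:
--                 return False, f"Op '{op_name}' missing required field: 'columns'"
--             method = op.get("method", "standard")
--             if method not in SCALE_METHODS:
--                 return False, f"Method '{method}' not valid for scale. Allowed: standard minmax"
--         elif op_name in {"label_encode", "onehot_encode", "drop_column", "drop_outliers", "convert_dtype"}: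
--             if "column" not in op:
--                 return False, f"Op '{op_name}' missing required field: 'column'"
--         elif op_name == "rename_column":
--             for field in ("from", "to"):
--                 if field not in op:
--                     return False, f"Op '{op_name}' missing required field: '{field}'"
--     return True, ""
-- ===== SOURCE B (Python) =====
-- # Table-driven re-implementation: one spec table maps each op name to its
-- # required fields and an optional enum-field check, replacing the if/elif chain.
--
-- MAX_OPS = 50
--
-- # op -> (required fields in check order,
-- #        optional (enum_field, default, allowed values, msg_prefix, msg_suffix))
-- _SPECS = {
--     "fill_nulls": (("column",),
--                    ("strategy", "median",
--                     ("bfill", "ffill", "mean", "median", "mode", "zero"),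
--                     "Strategy '",
--                     "' not valid for fill_nulls. Allowed: bfill ffill mean median mode zero")),
--     "drop_outliers": (("column",), None),
--     "label_encode": (("column",), None),
--     "onehot_encode": (("column",), None),
--     "scale": (("columns",),
--               ("method", "standard",
--                ("minmax", "standard"),
--                "Method '",
--                "' not valid for scale. Allowed: standard minmax")),
--     "drop_duplicates": ((), None),
--     "drop_column": (("column",), None),
--     "rename_column": (("from", "to"), None),
--     "convert_dtype": (("column",), None),
--     "bin_numeric": ((), None),
--     "add_date_parts": ((), None),
--     "log_transform": ((), None),
--     "drop_null_rows": ((), None),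
--     "clip_column": ((), None),
-- }
--
--
-- def _validate_ops(ops: list) -> tuple:
--     if not isinstance(ops, list):
--         return False, "ops must be a list of dicts."
--     if len(ops) > MAX_OPS:
--         return False, f"Too many ops: {len(ops)}. Max is {MAX_OPS}."
--     for op in ops:
--         if not isinstance(op, dict):
--             return False, "Op #%d is not a dict." % ops.index(op)
--         name = op.get("op", "")
--         spec = _SPECS.get(name)
--         if spec is None:
--             return False, f"Unknown op: '{name}'. Allowed: {', '.join(sorted(_SPECS))}"
--         required, enum = spec
--         for field in required:
--             if field not in op:
--                 return False, f"Op '{name}' missing required field: '{field}'"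
--         if enum is not None:
--             enum_field, default, allowed, prefix, suffix = enum
--             value = op.get(enum_field, default)
--             if value not in allowed:
--                 return False, prefix + value + suffix
--     return True, ""
-- ===== Notes on version B (the rewrite author's own statement) =====
-- stated objective: simpler
-- what changed: Replaces the per-op if/elif dispatch chain with a single spec table mapping each op name to its required fields and an optional enum-field check, so one generic loop does all per-op validation with identical messages.
import Mathlib
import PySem

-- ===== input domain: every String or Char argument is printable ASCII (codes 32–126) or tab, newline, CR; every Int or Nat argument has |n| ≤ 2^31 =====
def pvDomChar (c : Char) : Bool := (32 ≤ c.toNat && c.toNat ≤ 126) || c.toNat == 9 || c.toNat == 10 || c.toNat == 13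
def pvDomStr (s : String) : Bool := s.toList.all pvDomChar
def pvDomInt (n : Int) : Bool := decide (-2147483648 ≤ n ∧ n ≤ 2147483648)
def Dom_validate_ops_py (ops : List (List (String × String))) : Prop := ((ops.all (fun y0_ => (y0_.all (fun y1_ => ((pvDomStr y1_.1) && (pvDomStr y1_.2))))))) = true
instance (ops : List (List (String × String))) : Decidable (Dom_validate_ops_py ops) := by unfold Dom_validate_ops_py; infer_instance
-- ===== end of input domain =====

-- B replaces A's per-op if/elif chain by a single spec table (op → required fields +
-- optional enum check); return-value equivalence only, neither version mutates its input.

-- ===== PORT A =====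
-- `isinstance(ops, list)` / `isinstance(op, dict)` are always true under the type
-- convention (ops : List of dicts), so those two branches (and the enumerate index,
-- used only in the unreachable non-dict message) do not appear.
def pyALLOWED_OPS : PySem.Set String := PySem.Set.ofList
  ["fill_nulls", "drop_outliers", "label_encode", "onehot_encode", "scale",
   "drop_duplicates", "drop_column", "rename_column", "convert_dtype",
   "bin_numeric", "add_date_parts", "log_transform", "drop_null_rows", "clip_column"]

def pyFILL_STRATEGIES : PySem.Set String := PySem.Set.ofList
  ["mean", "median", "mode", "ffill", "bfill", "zero"]

def pySCALE_METHODS : PySem.Set String := PySem.Set.ofList ["standard", "minmax"]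

def pyMAX_OPS : Int := 50

-- A's `for field in ("from", "to")` loop (string comparison in `sorted` is exact on .toList)
def renameLoopA (op_name : String) (opd : PySem.Dict String String) : List String → Option (Bool × String)
  | [] => none
  | f :: fs =>
      if opd.contains f = false then
        some (false, PySem.Str.join "" ["Op '", op_name, "' missing required field: '", f, "'"])
      else renameLoopA op_name opd fs

def opsLoopA : List (List (String × String)) → Bool × String
  | [] => (true, "")
  | o :: rest =>
      let opd : PySem.Dict String String := PySem.Dict.mk o
      let op_name := opd.getD "op" ""
      if (PySem.Set.contains pyALLOWED_OPS op_name) = false then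
        (false, PySem.Str.join "" ["Unknown op: '", op_name, "'. Allowed: ",
          PySem.Str.join ", " (PySem.List.sorted pyALLOWED_OPS (fun x => x.toList) false)])
      else if op_name == "fill_nulls" then
        if opd.contains "column" = false then
          (false, PySem.Str.join "" ["Op '", op_name, "' missing required field: 'column'"])
        else
          let strategy := opd.getD "strategy" "median"
          if (PySem.Set.contains pyFILL_STRATEGIES strategy) = false then
            (false, PySem.Str.join "" ["Strategy '", strategy, "' not valid for fill_nulls. Allowed: ",
              PySem.Str.join " " (PySem.List.sorted pyFILL_STRATEGIES (fun x => x.toList) false)])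
          else opsLoopA rest
      else if op_name == "scale" then
        if opd.contains "columns" = false then
          (false, PySem.Str.join "" ["Op '", op_name, "' missing required field: 'columns'"])
        else
          let method := opd.getD "method" "standard"
          if (PySem.Set.contains pySCALE_METHODS method) = false then
            (false, PySem.Str.join "" ["Method '", method, "' not valid for scale. Allowed: standard minmax"])
          else opsLoopA rest
      else if (PySem.Set.contains (PySem.Set.ofList
                 ["label_encode", "onehot_encode", "drop_column", "drop_outliers", "convert_dtype"]) op_name) then
        if opd.contains "column" = false then
          (false, PySem.Str.join "" ["Op '", op_name, "' missing required field: 'column'"])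
        else opsLoopA rest
      else if op_name == "rename_column" then
        match renameLoopA op_name opd ["from", "to"] with
        | some r => r
        | none => opsLoopA rest
      else opsLoopA rest

def validate_ops_py (ops : List (List (String × String))) : Bool × String :=
  if (ops.length : Int) > pyMAX_OPS then
    (false, PySem.Str.join "" ["Too many ops: ", PySem.Int.toStr ops.length, ". Max is ", PySem.Int.toStr pyMAX_OPS, "."])
  else opsLoopA ops

-- ===== PORT B =====
-- op name → (required fields in check order, optional (enum field, default, allowed, msg prefix, msg suffix))
def specTableB : PySem.Dict String (List String × Option (String × String × List String × String × String)) :=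
  PySem.Dict.mk
    [("fill_nulls", (["column"], some ("strategy", "median",
        ["bfill", "ffill", "mean", "median", "mode", "zero"], "Strategy '",
        "' not valid for fill_nulls. Allowed: bfill ffill mean median mode zero"))),
     ("drop_outliers", (["column"], none)),
     ("label_encode", (["column"], none)),
     ("onehot_encode", (["column"], none)),
     ("scale", (["columns"], some ("method", "standard", ["minmax", "standard"], "Method '",
        "' not valid for scale. Allowed: standard minmax"))),
     ("drop_duplicates", ([], none)),
     ("drop_column", (["column"], none)),
     ("rename_column", (["from", "to"], none)),
     ("convert_dtype", (["column"], none)),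
     ("bin_numeric", ([], none)),
     ("add_date_parts", ([], none)),
     ("log_transform", ([], none)),
     ("drop_null_rows", ([], none)),
     ("clip_column", ([], none))]

def missingLoopB (name : String) (opd : PySem.Dict String String) : List String → Option (Bool × String)
  | [] => none
  | f :: fs =>
      if opd.contains f = false then
        some (false, PySem.Str.join "" ["Op '", name, "' missing required field: '", f, "'"])
      else missingLoopB name opd fs

def opsLoopB : List (List (String × String)) → Bool × String
  | [] => (true, "")
  | o :: rest =>
      let opd : PySem.Dict String String := PySem.Dict.mk o
      let name := opd.getD "op" ""
      match specTableB.get? name with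
      | none =>
          (false, PySem.Str.join "" ["Unknown op: '", name, "'. Allowed: ",
            PySem.Str.join ", " (PySem.List.sorted specTableB.keys (fun x => x.toList) false)])
      | some (required, enum) =>
          match missingLoopB name opd required with
          | some r => r
          | none =>
              match enum with
              | none => opsLoopB rest
              | some (enumField, dflt, allowed, prefixMsg, suffixMsg) =>
                  let v := opd.getD enumField dflt
                  if allowed.contains v = false then
                    (false, PySem.Str.join "" [prefixMsg, v, suffixMsg])
                  else opsLoopB rest

def validate_ops_py_alt (ops : List (List (String × String))) : Bool × String :=
  if (ops.length : Int) > 50 then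
    (false, PySem.Str.join "" ["Too many ops: ", PySem.Int.toStr ops.length, ". Max is ", PySem.Int.toStr 50, "."])
  else opsLoopB ops

-- ===== PRECONDITION & SPEC =====
def Spec_validate_ops_py (ops : List (List (String × String))) (out : Bool × String) : Prop := out = validate_ops_py_alt ops
instance (ops : List (List (String × String))) (out : Bool × String) : Decidable (Spec_validate_ops_py ops out) := by unfold Spec_validate_ops_py; infer_instance

-- ===== CLAIM (what is proved, stated in full; the proofs are below) =====
def Claim_equal_validate_ops_py : Prop := ∀ (ops : List (List (String × String))), Dom_validate_ops_py ops → Spec_validate_ops_py ops (validate_ops_py ops)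

-- ===== LEMMAS AND PROOFS =====

set_option maxRecDepth 8000 in
theorem loops_eq (l : List (List (String × String))) : opsLoopA l = opsLoopB l := by
  induction l with
  | nil => rfl
  | cons o rest ih =>
    simp only [opsLoopA, opsLoopB]
    by_cases h1 : (PySem.Dict.mk o).getD "op" "" = "fill_nulls"
    · have hF : ("fill_nulls":String) ∈ pyALLOWED_OPS := by decide
      have hMiss : PySem.Str.join "" ["Op '", ("fill_nulls":String), "' missing required field: 'column'"] = PySem.Str.join "" ["Op '", "fill_nulls", "' missing required field: '", "column", "'"] := String.toList_inj.mp (by decide)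
      have hMsg : ∀ v : String, PySem.Str.join "" ["Strategy '", v, "' not valid for fill_nulls. Allowed: ", ("bfill ffill mean median mode zero":String)] = PySem.Str.join "" ["Strategy '", v, "' not valid for fill_nulls. Allowed: bfill ffill mean median mode zero"] := fun v => String.toList_inj.mp (by simp [PySem.Str.join, PySem.Chars.join, List.intercalate])
      have hAll : PySem.Str.join " " (PySem.List.sorted pyFILL_STRATEGIES (fun x => x.toList) false) = "bfill ffill mean median mode zero" := String.toList_inj.mp (by decide)
      have hFill : pyFILL_STRATEGIES = ["mean","median","mode","ffill","bfill","zero"] := by decide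
      have hg : specTableB.get? "fill_nulls" = some (["column"], some ("strategy", "median", ["bfill", "ffill", "mean", "median", "mode", "zero"], "Strategy '", "' not valid for fill_nulls. Allowed: bfill ffill mean median mode zero")) := rfl
      simp only [h1, hg, missingLoopB, hAll]
      by_cases hc : (PySem.Dict.mk o).contains "column" = false
      · simp [hc, hMiss, hF]
      · by_cases a1 : (PySem.Dict.mk o).getD "strategy" "median" = "bfill" <;> by_cases a2 : (PySem.Dict.mk o).getD "strategy" "median" = "ffill" <;> by_cases a3 : (PySem.Dict.mk o).getD "strategy" "median" = "mean" <;> by_cases a4 : (PySem.Dict.mk o).getD "strategy" "median" = "median" <;> by_cases a5 : (PySem.Dict.mk o).getD "strategy" "median" = "mode" <;> by_cases a6 : (PySem.Dict.mk o).getD "strategy" "median" = "zero" <;> simp [hc, hF, hFill, hMsg, ih, *]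
    by_cases h2 : (PySem.Dict.mk o).getD "op" "" = "scale"
    · have hF : ("scale":String) ∈ pyALLOWED_OPS := by decide
      have hMiss : PySem.Str.join "" ["Op '", ("scale":String), "' missing required field: 'columns'"] = PySem.Str.join "" ["Op '", "scale", "' missing required field: '", "columns", "'"] := String.toList_inj.mp (by decide)
      have hScale : pySCALE_METHODS = ["standard","minmax"] := by decide
      have hg : specTableB.get? "scale" = some (["columns"], some ("method", "standard", ["minmax", "standard"], "Method '", "' not valid for scale. Allowed: standard minmax")) := rfl
      simp only [h2, hg, missingLoopB]
      by_cases hc : (PySem.Dict.mk o).contains "columns" = false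
      · simp [hc, hMiss, hF]
      · by_cases a1 : (PySem.Dict.mk o).getD "method" "standard" = "minmax" <;> by_cases a2 : (PySem.Dict.mk o).getD "method" "standard" = "standard" <;> simp [hc, hF, hScale, ih, *]
    by_cases h3 : (PySem.Dict.mk o).getD "op" "" = "label_encode"
    · have hF : ("label_encode":String) ∈ pyALLOWED_OPS := by decide
      have hS : PySem.Set.contains (PySem.Set.ofList ["label_encode", "onehot_encode", "drop_column", "drop_outliers", "convert_dtype"]) "label_encode" = true := by decide
      have hMiss : PySem.Str.join "" ["Op '", ("label_encode":String), "' missing required field: 'column'"] = PySem.Str.join "" ["Op '", "label_encode", "' missing required field: '", "column", "'"] := String.toList_inj.mp (by decide)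
      have hg : specTableB.get? "label_encode" = some (["column"], none) := rfl
      simp only [h3, hg, missingLoopB, hS]
      by_cases hc : (PySem.Dict.mk o).contains "column" = false
      · simp [hc, hMiss, hF]
      · simp [hc, hF, ih]
    by_cases h4 : (PySem.Dict.mk o).getD "op" "" = "onehot_encode"
    · have hF : ("onehot_encode":String) ∈ pyALLOWED_OPS := by decide
      have hS : PySem.Set.contains (PySem.Set.ofList ["label_encode", "onehot_encode", "drop_column", "drop_outliers", "convert_dtype"]) "onehot_encode" = true := by decide
      have hMiss : PySem.Str.join "" ["Op '", ("onehot_encode":String), "' missing required field: 'column'"] = PySem.Str.join "" ["Op '", "onehot_encode", "' missing required field: '", "column", "'"] := String.toList_inj.mp (by decide)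
      have hg : specTableB.get? "onehot_encode" = some (["column"], none) := rfl
      simp only [h4, hg, missingLoopB, hS]
      by_cases hc : (PySem.Dict.mk o).contains "column" = false
      · simp [hc, hMiss, hF]
      · simp [hc, hF, ih]
    by_cases h5 : (PySem.Dict.mk o).getD "op" "" = "drop_column"
    · have hF : ("drop_column":String) ∈ pyALLOWED_OPS := by decide
      have hS : PySem.Set.contains (PySem.Set.ofList ["label_encode", "onehot_encode", "drop_column", "drop_outliers", "convert_dtype"]) "drop_column" = true := by decide
      have hMiss : PySem.Str.join "" ["Op '", ("drop_column":String), "' missing required field: 'column'"] = PySem.Str.join "" ["Op '", "drop_column", "' missing required field: '", "column", "'"] := String.toList_inj.mp (by decide)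
      have hg : specTableB.get? "drop_column" = some (["column"], none) := rfl
      simp only [h5, hg, missingLoopB, hS]
      by_cases hc : (PySem.Dict.mk o).contains "column" = false
      · simp [hc, hMiss, hF]
      · simp [hc, hF, ih]
    by_cases h6 : (PySem.Dict.mk o).getD "op" "" = "drop_outliers"
    · have hF : ("drop_outliers":String) ∈ pyALLOWED_OPS := by decide
      have hS : PySem.Set.contains (PySem.Set.ofList ["label_encode", "onehot_encode", "drop_column", "drop_outliers", "convert_dtype"]) "drop_outliers" = true := by decide
      have hMiss : PySem.Str.join "" ["Op '", ("drop_outliers":String), "' missing required field: 'column'"] = PySem.Str.join "" ["Op '", "drop_outliers", "' missing required field: '", "column", "'"] := String.toList_inj.mp (by decide)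
      have hg : specTableB.get? "drop_outliers" = some (["column"], none) := rfl
      simp only [h6, hg, missingLoopB, hS]
      by_cases hc : (PySem.Dict.mk o).contains "column" = false
      · simp [hc, hMiss, hF]
      · simp [hc, hF, ih]
    by_cases h7 : (PySem.Dict.mk o).getD "op" "" = "convert_dtype"
    · have hF : ("convert_dtype":String) ∈ pyALLOWED_OPS := by decide
      have hS : PySem.Set.contains (PySem.Set.ofList ["label_encode", "onehot_encode", "drop_column", "drop_outliers", "convert_dtype"]) "convert_dtype" = true := by decide
      have hMiss : PySem.Str.join "" ["Op '", ("convert_dtype":String), "' missing required field: 'column'"] = PySem.Str.join "" ["Op '", "convert_dtype", "' missing required field: '", "column", "'"] := String.toList_inj.mp (by decide)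
      have hg : specTableB.get? "convert_dtype" = some (["column"], none) := rfl
      simp only [h7, hg, missingLoopB, hS]
      by_cases hc : (PySem.Dict.mk o).contains "column" = false
      · simp [hc, hMiss, hF]
      · simp [hc, hF, ih]
    by_cases h8 : (PySem.Dict.mk o).getD "op" "" = "rename_column"
    · have hF : ("rename_column":String) ∈ pyALLOWED_OPS := by decide
      have hS : PySem.Set.contains (PySem.Set.ofList ["label_encode", "onehot_encode", "drop_column", "drop_outliers", "convert_dtype"]) "rename_column" = false := by decide
      have hg : specTableB.get? "rename_column" = some (["from", "to"], none) := rfl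
      simp only [h8, hg, renameLoopA, missingLoopB, hS]
      by_cases hf : (PySem.Dict.mk o).contains "from" = false
      · simp [hf, hF]
      · by_cases ht : (PySem.Dict.mk o).contains "to" = false
        · simp [hf, ht, hF]
        · simp [hf, ht, hF, ih]
    by_cases h9 : (PySem.Dict.mk o).getD "op" "" = "drop_duplicates"
    · have hF : ("drop_duplicates":String) ∈ pyALLOWED_OPS := by decide
      have hS : PySem.Set.contains (PySem.Set.ofList ["label_encode", "onehot_encode", "drop_column", "drop_outliers", "convert_dtype"]) "drop_duplicates" = false := by decide
      have hg : specTableB.get? "drop_duplicates" = some ([], none) := rfl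
      simp [h9, hg, missingLoopB, hS, hF, ih]
    by_cases h10 : (PySem.Dict.mk o).getD "op" "" = "bin_numeric"
    · have hF : ("bin_numeric":String) ∈ pyALLOWED_OPS := by decide
      have hS : PySem.Set.contains (PySem.Set.ofList ["label_encode", "onehot_encode", "drop_column", "drop_outliers", "convert_dtype"]) "bin_numeric" = false := by decide
      have hg : specTableB.get? "bin_numeric" = some ([], none) := rfl
      simp [h10, hg, missingLoopB, hS, hF, ih]
    by_cases h11 : (PySem.Dict.mk o).getD "op" "" = "add_date_parts"
    · have hF : ("add_date_parts":String) ∈ pyALLOWED_OPS := by decide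
      have hS : PySem.Set.contains (PySem.Set.ofList ["label_encode", "onehot_encode", "drop_column", "drop_outliers", "convert_dtype"]) "add_date_parts" = false := by decide
      have hg : specTableB.get? "add_date_parts" = some ([], none) := rfl
      simp [h11, hg, missingLoopB, hS, hF, ih]
    by_cases h12 : (PySem.Dict.mk o).getD "op" "" = "log_transform"
    · have hF : ("log_transform":String) ∈ pyALLOWED_OPS := by decide
      have hS : PySem.Set.contains (PySem.Set.ofList ["label_encode", "onehot_encode", "drop_column", "drop_outliers", "convert_dtype"]) "log_transform" = false := by decide
      have hg : specTableB.get? "log_transform" = some ([], none) := rfl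
      simp [h12, hg, missingLoopB, hS, hF, ih]
    by_cases h13 : (PySem.Dict.mk o).getD "op" "" = "drop_null_rows"
    · have hF : ("drop_null_rows":String) ∈ pyALLOWED_OPS := by decide
      have hS : PySem.Set.contains (PySem.Set.ofList ["label_encode", "onehot_encode", "drop_column", "drop_outliers", "convert_dtype"]) "drop_null_rows" = false := by decide
      have hg : specTableB.get? "drop_null_rows" = some ([], none) := rfl
      simp [h13, hg, missingLoopB, hS, hF, ih]
    by_cases h14 : (PySem.Dict.mk o).getD "op" "" = "clip_column"
    · have hF : ("clip_column":String) ∈ pyALLOWED_OPS := by decide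
      have hS : PySem.Set.contains (PySem.Set.ofList ["label_encode", "onehot_encode", "drop_column", "drop_outliers", "convert_dtype"]) "clip_column" = false := by decide
      have hg : specTableB.get? "clip_column" = some ([], none) := rfl
      simp [h14, hg, missingLoopB, hS, hF, ih]
    -- unknown op: every branch test is false on both sides
    · have hS : PySem.Str.join ", " (PySem.List.sorted pyALLOWED_OPS (fun x => x.toList) false) = PySem.Str.join ", " (PySem.List.sorted specTableB.keys (fun x => x.toList) false) := String.toList_inj.mp (by decide)
      have hB : specTableB.get? ((PySem.Dict.mk o).getD "op" "") = none := by
        simp [specTableB, PySem.Dict.get?, Ne.symm h1, Ne.symm h2, Ne.symm h3, Ne.symm h4, Ne.symm h5, Ne.symm h6, Ne.symm h7, Ne.symm h8, Ne.symm h9, Ne.symm h10, Ne.symm h11, Ne.symm h12, Ne.symm h13, Ne.symm h14]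
      have hAl : pyALLOWED_OPS = ["fill_nulls", "drop_outliers", "label_encode", "onehot_encode", "scale", "drop_duplicates", "drop_column", "rename_column", "convert_dtype", "bin_numeric", "add_date_parts", "log_transform", "drop_null_rows", "clip_column"] := by decide
      have hA : PySem.Set.contains pyALLOWED_OPS ((PySem.Dict.mk o).getD "op" "") = false := by
        rw [hAl]; simp [List.contains_eq_mem, h1, h2, h3, h4, h5, h6, h7, h8, h9, h10, h11, h12, h13, h14]
      simp only [hA, hB, hS]
      simp

-- ===== VERDICT (by name: the statement is the Claim_ definition above) =====
theorem validate_ops_py_spec : Claim_equal_validate_ops_py := by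
  intro ops _
  unfold Spec_validate_ops_py validate_ops_py validate_ops_py_alt pyMAX_OPS
  split_ifs with h
  · rfl
  · exact loops_eq ops
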